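-- pv_equiv track=rewrite | github.com/ejfancher/crypto | classic_ciphers/transposition_cipher.py | key_to_alpha_rank
-- ===== SOURCE A (Python) =====
-- def key_to_alpha_rank(key):
--     key = key.lower()
--     ord_of_key = []
--     for char in key:
--         ord_of_key += [ord(char)]
--     key_alpa_ranks = []
--     for elem1 in ord_of_key:
--         my_rank = 0
--         for elem2 in ord_of_key:
--             if elem1 > elem2:
--                 my_rank += 1
--         while my_rank in key_alpa_ranks:
--             my_rank += 1
--         key_alpa_ranks += [my_rank]
--     return key_alpa_ranks
-- ===== SOURCE B (Python) =====
-- def key_to_alpha_rank(key):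
--     ords = [ord(c) for c in key.lower()]
--     freq = {}
--     for v in ords:
--         freq[v] = freq.get(v, 0) + 1
--     start = {}
--     acc = 0
--     for v in sorted(freq):
--         start[v] = acc
--         acc += freq[v]
--     out = []
--     for v in ords:
--         r = start[v]
--         out.append(r)
--         start[v] = r + 1
--     return out
-- ===== Notes on version B (the rewrite author's own statement) =====
-- stated objective: faster
-- what changed: Replaced A's nested compare-all loop plus linear membership scan that bumps an already-taken rank by a counting table: one frequency pass, cumulative start ranks over the sorted distinct ord values, then one pass emitting and incrementing the start rank of each character.
import Mathlib
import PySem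

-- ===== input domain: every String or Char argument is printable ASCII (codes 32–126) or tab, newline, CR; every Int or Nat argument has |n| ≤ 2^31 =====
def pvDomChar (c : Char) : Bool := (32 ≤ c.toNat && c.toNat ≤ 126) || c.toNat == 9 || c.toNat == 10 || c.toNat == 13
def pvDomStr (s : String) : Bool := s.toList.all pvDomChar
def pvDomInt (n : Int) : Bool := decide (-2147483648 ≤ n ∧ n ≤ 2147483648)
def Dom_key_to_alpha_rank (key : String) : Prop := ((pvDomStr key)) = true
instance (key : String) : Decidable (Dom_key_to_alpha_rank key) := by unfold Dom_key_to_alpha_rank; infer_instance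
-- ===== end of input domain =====

-- B replaces A's nested compare-all loop (plus linear 'while rank taken' scan) by a counting
-- table with cumulative start ranks; objective: faster.

-- ===== PORT A =====
-- termination helper for the 'while my_rank in key_alpa_ranks' loop (cited by decreasing_by)
theorem pv_bump_dec (ranks : List Int) (r : Int) (h : r ∈ ranks) :
    ranks.countP (fun x => decide (r < x)) < ranks.countP (fun x => decide (r ≤ x)) := by
  induction ranks with
  | nil => cases h
  | cons a t ih =>
    have hle : t.countP (fun x => decide (r < x)) ≤ t.countP (fun x => decide (r ≤ x)) := by
      apply List.countP_mono_left
      intro x _ hx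
      simp only [decide_eq_true_eq] at hx ⊢; omega
    rcases List.mem_cons.mp h with rfl | hmem
    · simp only [List.countP_cons]
      have h1 : (decide (r < r)) = false := by simp
      have h2 : (decide (r ≤ r)) = true := by simp
      rw [h1, h2]; simp; omega
    · have := ih hmem
      simp only [List.countP_cons]
      by_cases hc : r < a
      · have hc' : r ≤ a := by omega
        simp [hc, hc']; omega
      · by_cases hc2 : r ≤ a <;> simp [hc, hc2] <;> omega


-- the Python 'while my_rank in key_alpa_ranks: my_rank += 1'
def bump (ranks : List Int) (r : Int) : Int :=
  if h : r ∈ ranks then bump ranks (r + 1) else r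
termination_by ranks.countP (fun x => decide (r ≤ x))
decreasing_by
  have he : ranks.countP (fun x => decide (r + 1 ≤ x)) = ranks.countP (fun x => decide (r < x)) :=
    List.countP_congr (by intro x _; simp)
  rw [he]; exact pv_bump_dec ranks r h

def key_to_alpha_rank (key : String) : List Int :=
  let ord_of_key : List Int :=
    (PySem.Str.lower key).toList.foldl (fun acc c => acc ++ [(c.toNat : Int)]) []
  ord_of_key.foldl (fun ranks elem1 =>
    let my_rank := ord_of_key.foldl (fun m elem2 => if elem1 > elem2 then m + 1 else m) (0 : Int)
    ranks ++ [bump ranks my_rank]) []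

-- ===== PORT B =====
def key_to_alpha_rank_alt (key : String) : List Int :=
  let ords : List Int := (PySem.Str.lower key).toList.map (fun c => (c.toNat : Int))
  let freq : PySem.Dict Int Int :=
    ords.foldl (fun d v => d.modify v 0 (· + 1)) PySem.Dict.empty
  let start : PySem.Dict Int Int × Int :=
    (PySem.List.sorted freq.keys (fun x => x) false).foldl
      (fun (p : PySem.Dict Int Int × Int) v => (p.1.insert v p.2, p.2 + freq.getD v 0))
      (PySem.Dict.empty, 0)
  (ords.foldl (fun (p : List Int × PySem.Dict Int Int) v =>
      let r := p.2.getD v 0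
      (p.1 ++ [r], p.2.insert v (r + 1))) ([], start.1)).1

-- ===== PRECONDITION & SPEC =====
def Spec_key_to_alpha_rank (key : String) (out : List Int) : Prop := out = key_to_alpha_rank_alt key
instance (key : String) (out : List Int) : Decidable (Spec_key_to_alpha_rank key out) := by unfold Spec_key_to_alpha_rank; infer_instance

-- ===== CLAIM (what is proved, stated in full; the proofs are below) =====
def Claim_equal_key_to_alpha_rank : Prop := ∀ (key : String), Dom_key_to_alpha_rank key → Spec_key_to_alpha_rank key (key_to_alpha_rank key)

-- ===== LEMMAS AND PROOFS =====

-- number of entries of a strictly below v (as Int)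
def pvBase (a : List Int) (v : Int) : Int := (a.countP (fun x => decide (x < v)) : Int)

-- the common specification: ranks of suf, given that pre was already processed
def pvGo (a : List Int) (pre suf : List Int) : List Int :=
  match suf with
  | [] => []
  | v :: t => (pvBase a v + (pre.count v : Int)) :: pvGo a (pre ++ [v]) t

theorem pv_countP_add (a : List Int) (p q : Int → Bool) (h : ∀ x ∈ a, ¬(p x = true ∧ q x = true)) :
    a.countP (fun x => p x || q x) = a.countP p + a.countP q := by
  induction a with
  | nil => simp
  | cons x t ih =>
    have hx := h x (by simp)
    have ht : ∀ y ∈ t, ¬(p y = true ∧ q y = true) := fun y hy => h y (by simp [hy])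
    simp only [List.countP_cons]
    rw [ih ht]
    by_cases hp : p x = true <;> by_cases hq : q x = true <;>
      simp [hp, hq] at hx ⊢ <;> omega

theorem pv_base_add_count (a : List Int) (v : Int) :
    a.countP (fun x => decide (x < v)) + a.count v = a.countP (fun x => decide (x ≤ v)) := by
  have hd : ∀ x ∈ a, ¬((decide (x < v)) = true ∧ (x == v) = true) := by
    intro x _ ⟨h1, h2⟩
    simp only [decide_eq_true_eq, beq_iff_eq] at h1 h2; omega
  have := pv_countP_add a (fun x => decide (x < v)) (fun x => x == v) hd
  rw [List.count_eq_countP]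
  rw [← this]
  apply List.countP_congr
  intro x _
  by_cases h : x = v
  · simp [h]
  · simp [h]; omega

theorem pv_occurrence_split (v : Int) :
    ∀ (l : List Int) (t : Nat), t < l.count v → ∃ p1 p2, l = p1 ++ v :: p2 ∧ p1.count v = t := by
  intro l
  induction l with
  | nil => intro t ht; simp at ht
  | cons x l' ih =>
    intro t ht
    by_cases hx : x = v
    · subst hx
      cases t with
      | zero => exact ⟨[], l', rfl, by simp⟩
      | succ t' =>
        have : t' < l'.count x := by simp at ht; omega
        obtain ⟨p1, p2, hl, hc⟩ := ih t' this
        exact ⟨x :: p1, p2, by simp [hl], by simp [hc]⟩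
    · have : t < l'.count v := by simp [hx] at ht ⊢; omega
      obtain ⟨p1, p2, hl, hc⟩ := ih t this
      exact ⟨x :: p1, p2, by simp [hl], by simp [hx, hc]⟩

theorem pv_mem_go (a : List Int) :
    ∀ (suf pre0 : List Int) (m : Int),
      m ∈ pvGo a pre0 suf ↔
        ∃ p1 v p2, suf = p1 ++ v :: p2 ∧ m = pvBase a v + (((pre0 ++ p1).count v : Nat) : Int) := by
  intro suf
  induction suf with
  | nil => intro pre0 m; simp [pvGo]
  | cons w t ih =>
    intro pre0 m
    simp only [pvGo, List.mem_cons]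
    constructor
    · rintro (rfl | hmem)
      · exact ⟨[], w, t, rfl, by simp⟩
      · obtain ⟨p1, v, p2, hst, hm⟩ := (ih (pre0 ++ [w]) m).mp hmem
        exact ⟨w :: p1, v, p2, by simp [hst], by simpa [List.append_assoc] using hm⟩
    · rintro ⟨p1, v, p2, hst, hm⟩
      cases p1 with
      | nil =>
        simp at hst
        obtain ⟨rfl, rfl⟩ := hst
        left; simpa using hm
      | cons x p1' =>
        simp at hst
        obtain ⟨rfl, hst'⟩ := hst
        right
        exact (ih (pre0 ++ [w]) m).mpr ⟨p1', v, p2, hst', by simpa [List.append_assoc] using hm⟩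

theorem pv_bump_of_mem {ranks : List Int} {r : Int} (h : r ∈ ranks) :
    bump ranks r = bump ranks (r + 1) := by
  rw [bump]; simp [h]

theorem pv_bump_of_not_mem {ranks : List Int} {r : Int} (h : r ∉ ranks) :
    bump ranks r = r := by
  rw [bump]; simp [h]

theorem pv_bump_eq (ranks : List Int) :
    ∀ (d : Nat) (b : Int), (∀ t : Nat, t < d → b + (t : Int) ∈ ranks) →
      (b + (d : Int)) ∉ ranks → bump ranks b = b + d := by
  intro d
  induction d with
  | zero =>
    intro b _ hnot
    simp only [Nat.cast_zero, add_zero] at hnot ⊢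
    exact pv_bump_of_not_mem hnot
  | succ d' ih =>
    intro b hmem hnot
    have hb : b ∈ ranks := by simpa using hmem 0 (by omega)
    rw [pv_bump_of_mem hb]
    have h1 : ∀ t : Nat, t < d' → (b + 1) + (t : Int) ∈ ranks := by
      intro t ht
      have h := hmem (t + 1) (by omega)
      have he : b + ((t + 1 : Nat) : Int) = (b + 1) + (t : Int) := by push_cast; ring
      rwa [he] at h
    have h2 : (b + 1) + (d' : Int) ∉ ranks := by
      have he : b + ((d' + 1 : Nat) : Int) = (b + 1) + (d' : Int) := by push_cast; ring
      rw [← he]; exact hnot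
    rw [ih (b + 1) h1 h2]; push_cast; ring


theorem pv_bump_key (pre suf : List Int) (v : Int) :
    bump (pvGo (pre ++ v :: suf) [] pre) (pvBase (pre ++ v :: suf) v)
      = pvBase (pre ++ v :: suf) v + (pre.count v : Int) := by
  set a := pre ++ v :: suf with ha
  apply pv_bump_eq (pvGo a [] pre) (pre.count v) (pvBase a v)
  · -- every value pvBase a v + t with t < pre.count v is already taken
    intro t ht
    obtain ⟨p1, p2, hpre, hc⟩ := pv_occurrence_split v pre t ht
    rw [pv_mem_go]
    exact ⟨p1, v, p2, hpre, by simp [hc]⟩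
  · -- pvBase a v + pre.count v is free
    rw [pv_mem_go]
    rintro ⟨p1, w, p2, hpre, hm⟩
    simp only [List.nil_append] at hm
    rcases lt_trichotomy w v with hwv | rfl | hvw
    · -- w < v : its rank chain stays strictly below pvBase a v
      have hcw : p1.count w + 1 ≤ a.count w := by
        rw [ha, hpre]; simp [List.count_append, List.count_cons]
      have hle : a.countP (fun x => decide (x ≤ w)) ≤ a.countP (fun x => decide (x < v)) := by
        apply List.countP_mono_left
        intro x _ hx
        simp only [decide_eq_true_eq] at hx ⊢; omega
      have := pv_base_add_count a w
      simp only [pvBase] at hm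
      omega
    · -- w = v : earlier equal occurrence has a strictly smaller offset
      have : p1.count w < pre.count w := by
        subst hpre; simp only [List.count_append, List.count_cons_self]; omega
      simp only [pvBase] at hm
      omega
    · -- v < w : larger values start beyond pvBase a v + pre.count v
      have hcv : pre.count v + 1 ≤ a.count v := by
        rw [ha]; simp [List.count_append]
      have hle : a.countP (fun x => decide (x ≤ v)) ≤ a.countP (fun x => decide (x < w)) := by
        apply List.countP_mono_left
        intro x _ hx
        simp only [decide_eq_true_eq] at hx ⊢; omega
      have := pv_base_add_count a v
      simp only [pvBase] at hm
      omega

theorem pv_go_append (a : List Int) :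
    ∀ (l1 l2 pre : List Int), pvGo a pre (l1 ++ l2) = pvGo a pre l1 ++ pvGo a (pre ++ l1) l2 := by
  intro l1
  induction l1 with
  | nil => intro l2 pre; simp [pvGo]
  | cons x t ih =>
    intro l2 pre
    simp only [List.cons_append, pvGo, List.cons.injEq, true_and]
    rw [ih l2 (pre ++ [x]), List.append_assoc]
    simp

theorem pv_A_loop (a : List Int) :
    ∀ (suf pre : List Int), a = pre ++ suf →
      suf.foldl (fun ranks e1 => ranks ++ [bump ranks (pvBase a e1)]) (pvGo a [] pre)
        = pvGo a [] a := by
  intro suf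
  induction suf with
  | nil => intro pre h; simp at h; subst h; simp
  | cons v t ih =>
    intro pre h
    simp only [List.foldl_cons]
    have hk : bump (pvGo a [] pre) (pvBase a v) = pvBase a v + (pre.count v : Int) := by
      rw [h]; exact pv_bump_key pre t v
    rw [hk]
    have : pvGo a [] pre ++ [pvBase a v + (pre.count v : Int)] = pvGo a [] (pre ++ [v]) := by
      rw [pv_go_append a pre [v] []]
      simp [pvGo]
    rw [this]
    exact ih (pre ++ [v]) (by rw [h]; simp)

theorem pv_inner_count (e1 : Int) (l : List Int) :
    ∀ (init : Int), l.foldl (fun m e2 => if e1 > e2 then m + 1 else m) init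
      = init + (l.countP (fun x => decide (x < e1)) : Int) := by
  induction l with
  | nil => intro init; simp
  | cons x t ih =>
    intro init
    simp only [List.foldl_cons, List.countP_cons]
    by_cases hx : x < e1
    · rw [if_pos (by omega)]; rw [ih]; simp [hx]; ring
    · rw [if_neg (by omega)]; rw [ih]; simp [hx]

theorem pv_A_eq (a : List Int) :
    a.foldl (fun ranks elem1 =>
      ranks ++ [bump ranks (a.foldl (fun m elem2 => if elem1 > elem2 then m + 1 else m) (0 : Int))]) []
      = pvGo a [] a := by
  have hfn : ∀ (ranks : List Int) (elem1 : Int),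
      ranks ++ [bump ranks (a.foldl (fun m elem2 => if elem1 > elem2 then m + 1 else m) (0 : Int))]
        = ranks ++ [bump ranks (pvBase a elem1)] := by
    intro ranks elem1
    rw [pv_inner_count elem1 a 0]
    simp [pvBase]
  calc a.foldl (fun ranks elem1 =>
        ranks ++ [bump ranks (a.foldl (fun m elem2 => if elem1 > elem2 then m + 1 else m) (0 : Int))]) []
      = a.foldl (fun ranks e1 => ranks ++ [bump ranks (pvBase a e1)]) [] := by
        apply PySem.List.foldl_congr_mem
        intro acc x _; exact hfn acc x
    _ = pvGo a [] a := by
        have := pv_A_loop a a [] (by simp)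
        simpa [pvGo] using this

-- ----- B side -----

theorem pv_start_loop (a : List Int) :
    ∀ (s2 s1 : List Int) (d : PySem.Dict Int Int),
      (s1 ++ s2).Pairwise (· < ·) →
      (∀ x ∈ a, x ∈ s1 ++ s2) →
      (∀ u ∈ s1, d.getD u 0 = pvBase a u) →
      ∀ u ∈ s1 ++ s2,
        (s2.foldl (fun (p : PySem.Dict Int Int × Int) v => (p.1.insert v p.2, p.2 + (a.count v : Int)))
          (d, (a.countP (fun x => decide (x ∈ s1)) : Int))).1.getD u 0 = pvBase a u := by
  intro s2
  induction s2 with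
  | nil =>
    intro s1 d _ _ hd u hu
    simp only [List.foldl_nil]
    exact hd u (by simpa using hu)
  | cons v t ih =>
    intro s1 d hpw hcov hd u hu
    have hpw' := hpw
    rw [List.pairwise_append] at hpw'
    obtain ⟨hpw1, hpw2, hcross⟩ := hpw'
    have hvlt : ∀ w ∈ t, v < w := (List.pairwise_cons.mp hpw2).1
    have hs1v : ∀ u ∈ s1, u < v := fun u hu => hcross u hu v (by simp)
    -- the accumulator equals pvBase a v
    have hacc : (a.countP (fun x => decide (x ∈ s1)) : Int) = pvBase a v := by
      simp only [pvBase]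
      congr 1
      apply List.countP_congr
      intro x hx
      have hxc := hcov x hx
      simp only [decide_eq_true_eq]
      constructor
      · exact hs1v x
      · intro hxv
        rcases List.mem_append.mp hxc with h1 | h2
        · exact h1
        · exfalso
          rcases List.mem_cons.mp h2 with rfl | h3
          · omega
          · have := hvlt x h3; omega
    have hvns1 : v ∉ s1 := fun hc => absurd (hs1v v hc) (by omega)
    -- new accumulator equals countP over s1 ++ [v]
    have haccs : (a.countP (fun x => decide (x ∈ s1)) : Int) + (a.count v : Int)
        = (a.countP (fun x => decide (x ∈ s1 ++ [v])) : Int) := by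
      have hd2 : ∀ x ∈ a, ¬((decide (x ∈ s1)) = true ∧ (x == v) = true) := by
        intro x _ ⟨h1, h2⟩
        have := of_decide_eq_true h1
        have := beq_iff_eq.mp h2
        subst this
        exact hvns1 (of_decide_eq_true h1)
      have hsum := pv_countP_add a (fun x => decide (x ∈ s1)) (fun x => x == v) hd2
      have hcong : a.countP (fun x => decide (x ∈ s1 ++ [v]))
          = a.countP (fun x => decide (x ∈ s1) || (x == v)) := by
        apply List.countP_congr
        intro x _
        simp [List.mem_append]
      rw [hcong, hsum, List.count_eq_countP]
      push_cast; ring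
    simp only [List.foldl_cons]
    rw [hacc, ← hacc, haccs]
    have hd' : ∀ u ∈ s1 ++ [v],
        ((d.insert v ((a.countP (fun x => decide (x ∈ s1)) : Int))).getD u 0) = pvBase a u := by
      intro u hu
      rcases List.mem_append.mp hu with h1 | h2
      · have hne : u ≠ v := by have := hs1v u h1; omega
        rw [PySem.Dict.getD_insert_of_ne _ _ _ hne]
        exact hd u h1
      · have : u = v := by simpa using h2
        subst this
        rw [PySem.Dict.getD_insert_self]
        exact hacc
    have := ih (s1 ++ [v]) (d.insert v ((a.countP (fun x => decide (x ∈ s1)) : Int)))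
      (by rwa [← List.append_cons] ) (by rw [← List.append_cons]; exact hcov) hd'
      u (by rw [← List.append_cons]; exact hu)
    simpa using this

theorem pv_out_loop (a : List Int) :
    ∀ (suf pre out : List Int) (d : PySem.Dict Int Int),
      (∀ x ∈ suf, x ∈ a) →
      (∀ v ∈ a, d.getD v 0 = pvBase a v + (pre.count v : Int)) →
      (suf.foldl (fun (p : List Int × PySem.Dict Int Int) v =>
          (p.1 ++ [p.2.getD v 0], p.2.insert v (p.2.getD v 0 + 1))) (out, d)).1
        = out ++ pvGo a pre suf := by
  intro suf
  induction suf with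
  | nil => intro pre out d _ _; simp [pvGo]
  | cons v t ih =>
    intro pre out d hmem hd
    have hv : v ∈ a := hmem v (by simp)
    have hr : d.getD v 0 = pvBase a v + (pre.count v : Int) := hd v hv
    have hd' : ∀ u ∈ a, (d.insert v (d.getD v 0 + 1)).getD u 0
        = pvBase a u + (((pre ++ [v]).count u : Nat) : Int) := by
      intro u hu
      rw [PySem.Dict.getD_insert]
      by_cases he : u = v
      · subst he
        rw [if_pos rfl, hd u hu]
        simp [List.count_append]
        ring
      · rw [if_neg he, hd u hu]
        have : (v :: ([] : List Int)).count u = 0 := by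
          simp [List.count_cons]; omega
        simp [List.count_append, this]
    rw [hr] at hd'
    simp only [List.foldl_cons, pvGo]
    rw [hr]
    have := ih (pre ++ [v]) (out ++ [pvBase a v + (pre.count v : Int)])
      (d.insert v (pvBase a v + (pre.count v : Int) + 1))
      (fun x hx => hmem x (by simp [hx])) hd'
    rw [this]
    simp

theorem pv_B_eq (a : List Int) :
    (a.foldl (fun (p : List Int × PySem.Dict Int Int) v =>
        (p.1 ++ [p.2.getD v 0], p.2.insert v (p.2.getD v 0 + 1)))
      ([],
        ((PySem.List.sorted ((a.foldl (fun d v => d.modify v 0 (· + 1)) (PySem.Dict.empty : PySem.Dict Int Int)).keys)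
            (fun x => x) false).foldl
          (fun (p : PySem.Dict Int Int × Int) v =>
            (p.1.insert v p.2, p.2 + (a.foldl (fun d v => d.modify v 0 (· + 1)) (PySem.Dict.empty : PySem.Dict Int Int)).getD v 0))
          (PySem.Dict.empty, 0)).1)).1
      = pvGo a [] a := by
  have hfreq : ∀ v, (a.foldl (fun d v => d.modify v 0 (· + 1)) (PySem.Dict.empty : PySem.Dict Int Int)).getD v 0
      = (a.count v : Int) := by
    intro v
    rw [PySem.Dict.getD_foldl_modify_add_one]
    simp
  have hkeys : (a.foldl (fun d v => d.modify v 0 (· + 1)) (PySem.Dict.empty : PySem.Dict Int Int)).keys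
      = PySem.Set.ofList a := by
    rw [PySem.Dict.keys_foldl_modify, PySem.Dict.keys_empty]
    rfl
  set s : List Int := PySem.List.sorted (PySem.Set.ofList a) (fun x => x) false with hs
  have hpw : s.Pairwise (· < ·) := PySem.List.sorted_ofList_pairwise_lt a
  have hcov : ∀ x ∈ a, x ∈ s := by
    intro x hx
    rw [hs, PySem.List.mem_sorted]
    exact (PySem.Set.mem_ofList a x).mpr hx
  -- rewrite the freq lookups inside the start fold to counts
  have hstartfold :
      ((PySem.List.sorted ((a.foldl (fun d v => d.modify v 0 (· + 1)) (PySem.Dict.empty : PySem.Dict Int Int)).keys)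
          (fun x => x) false).foldl
        (fun (p : PySem.Dict Int Int × Int) v =>
          (p.1.insert v p.2, p.2 + (a.foldl (fun d v => d.modify v 0 (· + 1)) (PySem.Dict.empty : PySem.Dict Int Int)).getD v 0))
        (PySem.Dict.empty, 0))
      = (s.foldl (fun (p : PySem.Dict Int Int × Int) v => (p.1.insert v p.2, p.2 + (a.count v : Int)))
        (PySem.Dict.empty, 0)) := by
    rw [hkeys, ← hs]
    apply PySem.List.foldl_congr_mem
    intro acc x _
    rw [hfreq]
  rw [hstartfold]
  have hstart : ∀ u ∈ a,
      ((s.foldl (fun (p : PySem.Dict Int Int × Int) v => (p.1.insert v p.2, p.2 + (a.count v : Int)))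
        (PySem.Dict.empty, 0)).1).getD u 0 = pvBase a u := by
    intro u hu
    have h0 : ((0 : Int)) = (a.countP (fun x => decide (x ∈ ([] : List Int))) : Int) := by simp
    have := pv_start_loop a s [] PySem.Dict.empty (by simpa using hpw)
      (by intro x hx; simpa using hcov x hx) (by intro u hu; simp at hu)
      u (by simpa using hcov u hu)
    rw [h0]
    simpa using this
  have := pv_out_loop a a [] []
    ((s.foldl (fun (p : PySem.Dict Int Int × Int) v => (p.1.insert v p.2, p.2 + (a.count v : Int)))
      (PySem.Dict.empty, 0)).1)
    (fun x hx => hx)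
    (by intro v hv; rw [hstart v hv]; simp)
  simpa using this

-- ===== VERDICT (by name: the statement is the Claim_ definition above) =====
set_option maxHeartbeats 1000000 in
theorem key_to_alpha_rank_spec : Claim_equal_key_to_alpha_rank := by
  intro key _
  show key_to_alpha_rank key = key_to_alpha_rank_alt key
  unfold key_to_alpha_rank key_to_alpha_rank_alt
  simp only [PySem.List.foldl_append_singleton_eq_map, List.nil_append]
  exact (pv_A_eq ((PySem.Str.lower key).toList.map (fun c => ((c.toNat : Int))))).trans
    (pv_B_eq ((PySem.Str.lower key).toList.map (fun c => ((c.toNat : Int))))).symm
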